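-- pv_equiv track=rewrite | github.com/asheorann/bioinformatics_algorithms | 06_Rearragements/6.3_2_Break_Distance_Problem.py | ColoredEdges
-- ===== SOURCE A (Python) =====
-- from typing import List, Dict, Iterable, Tuple
--
-- def ColoredEdges(P: List[List[int]]) -> List[Tuple[int, int]]:
--     edges = []
--     for chromosome in P:
--         nodes = ChromosomeToCycle(chromosome)
--         n = len(nodes)
--         for i in range(1,n,2):
--             if  i==(n-1):
--                 edge = (nodes[n-1], nodes[0])
--                 edges.append(edge)
--                 break
--             else:
--                 edge = (nodes[i], nodes[i+1])
--                 edges.append(edge)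
--     return edges
--
-- def ChromosomeToCycle(Chromosome: List[int]) -> List[int]:
--     output = []
--
--     for i in range(len(Chromosome)):
--         j = (abs(Chromosome[i])-1)*2+1
--         if Chromosome[i]>0:
--             output.append(j)
--             output.append(j+1)
--         else:
--             output.append(j+1)
--             output.append(j)
--     return output
-- ===== SOURCE B (Python) =====
-- from typing import List, Tuple
--
-- def ColoredEdges(P: List[List[int]]) -> List[Tuple[int, int]]:
--     # head(v): node where the block is entered; tail(v): node it is left from.
--     def head(v: int) -> int:
--         return 2 * v - 1 if v > 0 else -2 * v
--
--     def tail(v: int) -> int: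
--         return 2 * v if v > 0 else -2 * v - 1
--
--     edges = []
--     for c in P:
--         L = len(c)
--         for m in range(L):
--             edges.append((tail(c[m]), head(c[(m + 1) % L])))
--     return edges
-- ===== Notes on version B (the rewrite author's own statement) =====
-- stated objective: simpler
-- what changed: B computes each edge's endpoints directly from the signed elements via head/tail formulas and a cyclic (m+1) % L index, eliminating the intermediate ChromosomeToCycle node array and the odd-index/break loop of A.
import Mathlib
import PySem

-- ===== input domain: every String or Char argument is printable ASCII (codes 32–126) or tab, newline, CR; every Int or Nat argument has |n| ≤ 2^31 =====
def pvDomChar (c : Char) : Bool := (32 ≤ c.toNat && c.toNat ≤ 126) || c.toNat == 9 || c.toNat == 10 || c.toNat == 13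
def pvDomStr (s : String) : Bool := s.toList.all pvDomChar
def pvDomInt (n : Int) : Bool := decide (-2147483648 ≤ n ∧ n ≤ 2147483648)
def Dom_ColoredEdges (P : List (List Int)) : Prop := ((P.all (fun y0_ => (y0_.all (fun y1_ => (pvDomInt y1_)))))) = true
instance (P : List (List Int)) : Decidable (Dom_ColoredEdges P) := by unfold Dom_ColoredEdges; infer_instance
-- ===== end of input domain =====

-- B replaces A's intermediate node array and break-terminated odd-index loop by direct
-- head/tail endpoint formulas with a cyclic (m+1) % L successor index (objective: simpler).

-- ===== PORT A =====
-- helper of A: builds the node list (append-accumulating fold = the Python for loop)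
def ChromosomeToCycle (Chromosome : List Int) : List Int :=
  Chromosome.foldl (fun output v =>
    let j := (|v| - 1) * 2 + 1
    if v > 0 then output ++ [j, j + 1] else output ++ [j + 1, j]) []

-- A's inner loop 'for i in range(1, n, 2)' with the break at i = n-1.
-- All indices used are in range (n = nodes.length, i odd < n), so getD 0 is exact.
def edgeLoopA (nodes : List Int) (n i : Nat) : List (Int × Int) :=
  if _h : i < n then
    if i = n - 1 then [(nodes.getD (n - 1) 0, nodes.getD 0 0)]
    else (nodes.getD i 0, nodes.getD (i + 1) 0) :: edgeLoopA nodes n (i + 2)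
  else []
termination_by n - i

def ColoredEdges (P : List (List Int)) : List (Int × Int) :=
  P.foldl (fun edges chromosome =>
    let nodes := ChromosomeToCycle chromosome
    edges ++ edgeLoopA nodes nodes.length 1) []

-- ===== PORT B =====
def pvHead (v : Int) : Int := if v > 0 then 2 * v - 1 else -2 * v
def pvTail (v : Int) : Int := if v > 0 then 2 * v else -2 * v - 1

-- indices m and (m+1) % L are in range, so getD 0 is exact for Python's c[...]
def ColoredEdges_alt (P : List (List Int)) : List (Int × Int) :=
  P.foldl (fun edges c =>
    edges ++ (List.range c.length).map (fun m =>
      (pvTail (c.getD m 0), pvHead (c.getD ((m + 1) % c.length) 0)))) []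

-- ===== PRECONDITION & SPEC =====
def Spec_ColoredEdges (P : List (List Int)) (out : List (Int × Int)) : Prop := out = ColoredEdges_alt P
instance (P : List (List Int)) (out : List (Int × Int)) : Decidable (Spec_ColoredEdges P out) := by unfold Spec_ColoredEdges; infer_instance

-- ===== CLAIM (what is proved, stated in full; the proofs are below) =====
def Claim_equal_ColoredEdges : Prop := ∀ (P : List (List Int)), Dom_ColoredEdges P → Spec_ColoredEdges P (ColoredEdges P)

-- ===== LEMMAS AND PROOFS =====

def pvPair (v : Int) : List Int := [pvHead v, pvTail v]

lemma ctc_eq (c : List Int) : ChromosomeToCycle c = c.flatMap pvPair := by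
  suffices h : ∀ acc : List Int,
      c.foldl (fun output v =>
        let j := (|v| - 1) * 2 + 1
        if v > 0 then output ++ [j, j + 1] else output ++ [j + 1, j]) acc
        = acc ++ c.flatMap pvPair by
    simpa [ChromosomeToCycle] using h []
  induction c with
  | nil => intro acc; simp
  | cons v rest ih =>
    intro acc
    simp only [List.foldl_cons, List.flatMap_cons, ih]
    by_cases hv : v > 0
    · rw [abs_of_pos hv]
      simp only [pvPair, pvHead, pvTail, if_pos hv]
      have h1 : (v - 1) * 2 + 1 = 2 * v - 1 := by ring
      have h2 : (v - 1) * 2 + 1 + 1 = 2 * v := by ring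
      simp [h1]
    · rw [abs_of_nonpos (by omega)]
      simp only [pvPair, pvHead, pvTail, if_neg hv]
      have h1 : (-v - 1) * 2 + 1 + 1 = -2 * v := by ring
      have h2 : (-v - 1) * 2 + 1 = -2 * v - 1 := by ring
      simp [h2]

lemma flatMap_pair_length (c : List Int) : (c.flatMap pvPair).length = 2 * c.length := by
  induction c with
  | nil => simp
  | cons v rest ih => simp [pvPair, ih]; omega

lemma flatMap_pair_getD (c : List Int) (m : Nat) (hm : m < c.length) :
    (c.flatMap pvPair).getD (2 * m) 0 = pvHead (c.getD m 0) ∧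
    (c.flatMap pvPair).getD (2 * m + 1) 0 = pvTail (c.getD m 0) := by
  induction c generalizing m with
  | nil => simp at hm
  | cons v rest ih =>
    cases m with
    | zero => simp [pvPair]
    | succ m =>
      have hm' : m < rest.length := by simpa using hm
      have := ih m hm'
      have h2 : 2 * (m + 1) = (2 * m) + 2 := by ring
      simp only [List.flatMap_cons, pvPair, h2]
      simpa using this

lemma edgeLoopA_spec (c : List Int) :
    ∀ (d k : Nat), c.length - k = d → k ≤ c.length →
    edgeLoopA (c.flatMap pvPair) (2 * c.length) (2 * k + 1) =
      (List.range' k (c.length - k)).map (fun m =>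
        (pvTail (c.getD m 0), pvHead (c.getD ((m + 1) % c.length) 0))) := by
  intro d
  induction d with
  | zero =>
    intro k hd hk
    have hkL : k = c.length := by omega
    rw [edgeLoopA]
    simp [hkL]
  | succ d ih =>
    intro k hd hk
    have hkL : k < c.length := by omega
    rw [edgeLoopA]
    have hlt : 2 * k + 1 < 2 * c.length := by omega
    by_cases hlast : k = c.length - 1
    · have heq : 2 * k + 1 = 2 * c.length - 1 := by omega
      have hrange : c.length - k = 1 := by omega
      have h1 : (c.flatMap pvPair).getD (2 * c.length - 1) 0 = pvTail (c.getD k 0) := by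
        have := (flatMap_pair_getD c k hkL).2
        rw [← this]; congr 1; omega
      have h2 : (c.flatMap pvPair).getD 0 0 = pvHead (c.getD 0 0) := by
        have := (flatMap_pair_getD c 0 (by omega)).1
        simpa using this
      have hmod : (k + 1) % c.length = 0 := by
        have : k + 1 = c.length := by omega
        simp [this]
      rw [dif_pos hlt, if_pos heq, hrange]
      simp only [List.range'_one, List.map_cons, List.map_nil, hmod, h1, h2]
    · have hne : ¬ (2 * k + 1 = 2 * c.length - 1) := by omega
      have hk1 : k + 1 < c.length := by omega
      have h1 := (flatMap_pair_getD c k hkL).2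
      have h2 : (c.flatMap pvPair).getD (2 * k + 1 + 1) 0 = pvHead (c.getD (k + 1) 0) := by
        have := (flatMap_pair_getD c (k + 1) hk1).1
        rw [← this]; congr 1
      have hstep : 2 * k + 1 + 2 = 2 * (k + 1) + 1 := by ring
      have hmod : (k + 1) % c.length = k + 1 := Nat.mod_eq_of_lt hk1
      have hrange : c.length - k = (c.length - (k + 1)) + 1 := by omega
      rw [dif_pos hlt, if_neg hne, hstep, ih (k + 1) (by omega) (by omega)]
      rw [hrange, List.range'_succ]
      simp only [List.map_cons, hmod, h1, h2]

lemma chrom_eq (c : List Int) :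
    edgeLoopA (ChromosomeToCycle c) (ChromosomeToCycle c).length 1 =
      (List.range c.length).map (fun m =>
        (pvTail (c.getD m 0), pvHead (c.getD ((m + 1) % c.length) 0))) := by
  rw [ctc_eq, flatMap_pair_length, List.range_eq_range']
  have := edgeLoopA_spec c (c.length - 0) 0 rfl (Nat.zero_le _)
  simpa using this

lemma folds_eq (P : List (List Int)) : ∀ acc : List (Int × Int),
    P.foldl (fun edges chromosome =>
      let nodes := ChromosomeToCycle chromosome
      edges ++ edgeLoopA nodes nodes.length 1) acc =
    P.foldl (fun edges c =>
      edges ++ (List.range c.length).map (fun m =>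
        (pvTail (c.getD m 0), pvHead (c.getD ((m + 1) % c.length) 0)))) acc := by
  induction P with
  | nil => intro acc; rfl
  | cons c rest ih =>
    intro acc
    simp only [List.foldl_cons, chrom_eq c, ih]

-- ===== VERDICT (by name: the statement is the Claim_ definition above) =====
theorem ColoredEdges_spec : Claim_equal_ColoredEdges := by
  intro P _
  unfold Spec_ColoredEdges ColoredEdges ColoredEdges_alt
  exact folds_eq P []
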